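-- pv_equiv track=rewrite | github.com/jcotter814/Phase-Transitions-in-Graph-Coloring | erdos_renyi.py | greedy_util
-- ===== SOURCE A (Python) =====
-- def greedy_util(colors):
--     """
--     Finds the mex (minimum excluded value) of the color list.
--     Inputs:
--         colors: list, colors already used
--     Outputs:
--         i: int, new color to be used
--     """
--     unique_colors = set(colors)
--     i = 0
--
--     while i >= 0:
--         if i not in unique_colors:
--             return i
--         else:
--             i+=1
--
--     return i
-- ===== SOURCE B (Python) =====
-- def greedy_util(colors):
--     """
--     Finds the mex (minimum excluded value) of the color list.
--     Inputs:
--         colors: list, colors already used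
--     Outputs:
--         i: int, new color to be used
--     """
--     cand = 0
--     for v in sorted(set(colors)):
--         if v == cand:
--             cand += 1
--         elif v > cand:
--             break
--         # v < cand: skip (negatives / already passed)
--     return cand
-- ===== Notes on version B (the rewrite author's own statement) =====
-- stated objective: alternative
-- what changed: B computes the mex by a single monotone walk over the sorted distinct values (increment on match, early break on a gap) instead of A's upward scan that probes set membership for each candidate 0,1,2,...
import Mathlib
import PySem

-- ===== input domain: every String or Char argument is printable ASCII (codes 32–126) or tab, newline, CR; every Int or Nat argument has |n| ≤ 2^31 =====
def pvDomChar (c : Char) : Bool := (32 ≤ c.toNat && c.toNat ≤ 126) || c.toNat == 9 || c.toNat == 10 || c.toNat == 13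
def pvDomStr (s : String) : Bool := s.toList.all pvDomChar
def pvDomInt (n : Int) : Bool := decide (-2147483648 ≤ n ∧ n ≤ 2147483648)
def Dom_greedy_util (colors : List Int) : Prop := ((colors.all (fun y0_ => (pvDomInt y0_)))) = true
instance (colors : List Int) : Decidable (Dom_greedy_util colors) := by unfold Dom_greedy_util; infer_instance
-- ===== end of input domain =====

-- B replaces A's upward membership-probing scan by one monotone walk over the sorted distinct values (alternative decomposition, similar cost).

-- ===== PORT A =====
-- A's while-loop: probe i = 0,1,2,… until i ∉ unique_colors.  The loop terminates after at most
-- (number of distinct colors)+1 probes, so that fuel makes the same computation total.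
def greedy_util_loop (s : PySem.Set Int) (i : Int) : Nat → Int
  | 0 => i
  | fuel+1 =>
    if i ≥ 0 then
      if i ∉ s then i
      else greedy_util_loop s (i+1) fuel
    else i

def greedy_util (colors : List Int) : Int :=
  let unique_colors : PySem.Set Int := PySem.Set.ofList colors
  greedy_util_loop unique_colors 0 (unique_colors.length + 1)

-- ===== PORT B =====
-- the 'for v in sorted(set(colors))' walk with early break
def greedy_util_alt_walk (cand : Int) : List Int → Int
  | [] => cand
  | v :: rest =>
    if v = cand then greedy_util_alt_walk (cand+1) rest
    else if v > cand then cand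
    else greedy_util_alt_walk cand rest

def greedy_util_alt (colors : List Int) : Int :=
  greedy_util_alt_walk 0 (PySem.List.sorted (PySem.Set.ofList colors) (fun x => x) false)

-- ===== PRECONDITION & SPEC =====
def Spec_greedy_util (colors : List Int) (out : Int) : Prop := out = greedy_util_alt colors
instance (colors : List Int) (out : Int) : Decidable (Spec_greedy_util colors out) := by unfold Spec_greedy_util; infer_instance

-- ===== CLAIM (what is proved, stated in full; the proofs are below) =====
def Claim_equal_greedy_util : Prop := ∀ (colors : List Int), Dom_greedy_util colors → Spec_greedy_util colors (greedy_util colors)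

-- ===== LEMMAS AND PROOFS =====

-- "r is the least integer ≥ start not in S"
def IsMexFrom (S : List Int) (start r : Int) : Prop :=
  start ≤ r ∧ r ∉ S ∧ ∀ j : Int, start ≤ j → j < r → j ∈ S

theorem isMexFrom_unique {S : List Int} {start r₁ r₂ : Int}
    (h₁ : IsMexFrom S start r₁) (h₂ : IsMexFrom S start r₂) : r₁ = r₂ := by
  obtain ⟨a₁, b₁, c₁⟩ := h₁
  obtain ⟨a₂, b₂, c₂⟩ := h₂
  by_contra hne
  rcases lt_or_gt_of_ne hne with h | h
  · exact b₁ (c₂ r₁ a₁ h)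
  · exact b₂ (c₁ r₂ a₂ h)

theorem walk_isMexFrom (l : List Int) :
    ∀ cand : Int, l.Pairwise (· < ·) →
      IsMexFrom l cand (greedy_util_alt_walk cand l) := by
  induction l with
  | nil =>
    intro cand _
    refine ⟨le_refl _, by simp [greedy_util_alt_walk], ?_⟩
    intro j hj hjlt
    simp only [greedy_util_alt_walk] at hjlt
    omega
  | cons v rest ih =>
    intro cand hpw
    have hv : ∀ x ∈ rest, v < x := (List.pairwise_cons.mp hpw).1
    have hrest := (List.pairwise_cons.mp hpw).2
    by_cases hveq : v = cand
    · subst hveq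
      have hstep : greedy_util_alt_walk v (v :: rest) = greedy_util_alt_walk (v + 1) rest := by
        simp [greedy_util_alt_walk]
      rw [hstep]
      have ⟨ha, hb, hc⟩ := ih (v + 1) hrest
      refine ⟨by omega, ?_, ?_⟩
      · intro hmem
        rcases List.mem_cons.mp hmem with h | h
        · omega
        · exact hb h
      · intro j hj hjlt
        by_cases hjv : j = v
        · exact hjv ▸ List.mem_cons_self
        · exact List.mem_cons_of_mem _ (hc j (by omega) hjlt)
    · by_cases hgt : v > cand
      · have hstep : greedy_util_alt_walk cand (v :: rest) = cand := by
          simp [greedy_util_alt_walk, hveq, hgt]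
        rw [hstep]
        refine ⟨le_refl _, ?_, ?_⟩
        · intro hmem
          rcases List.mem_cons.mp hmem with h | h
          · omega
          · have := hv _ h; omega
        · intro j hj hjlt; omega
      · -- v < cand: skip
        have hstep : greedy_util_alt_walk cand (v :: rest) = greedy_util_alt_walk cand rest := by
          simp [greedy_util_alt_walk, hveq, hgt]
        rw [hstep]
        have ⟨ha, hb, hc⟩ := ih cand hrest
        refine ⟨ha, ?_, ?_⟩
        · intro hmem
          rcases List.mem_cons.mp hmem with h | h
          · omega
          · exact hb h
        · intro j hj hjlt
          exact List.mem_cons_of_mem _ (hc j hj hjlt)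

theorem loop_isMexFrom (s : PySem.Set Int) :
    ∀ (fuel : Nat) (i : Int), 0 ≤ i →
      (∃ k : Int, i ≤ k ∧ k < i + fuel ∧ k ∉ s) →
      IsMexFrom s i (greedy_util_loop s i fuel) := by
  intro fuel
  induction fuel with
  | zero =>
    intro i _ ⟨k, h1, h2, _⟩
    omega
  | succ fuel ih =>
    intro i hi ⟨k, hk1, hk2, hk3⟩
    simp only [greedy_util_loop, if_pos hi]
    by_cases hmem : i ∈ s
    · rw [if_neg (not_not_intro hmem)]
      have hki : k ≠ i := fun h => hk3 (h ▸ hmem)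
      have ⟨ha, hb, hc⟩ := ih (i + 1) (by omega) ⟨k, by omega, by push_cast at hk2 ⊢; omega, hk3⟩
      refine ⟨by omega, hb, ?_⟩
      intro j hj hjlt
      by_cases hji : j = i
      · exact hji ▸ hmem
      · exact hc j (by omega) hjlt
    · rw [if_pos hmem]
      exact ⟨le_refl _, hmem, fun j hj hjlt => absurd hjlt (by omega)⟩

-- Within the first (length + 1) nonnegative integers, one is missing from the nodup set.
theorem escape_exists (s : PySem.Set Int) :
    ∃ k : Int, 0 ≤ k ∧ k < (0 : Int) + (s.length + 1 : Nat) ∧ k ∉ s := by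
  by_contra h
  push Not at h
  have hsub : ((List.range (s.length + 1)).map (fun n : Nat => (n : Int))) ⊆ s := by
    intro x hx
    simp only [List.mem_map, List.mem_range] at hx
    obtain ⟨n, hn, rfl⟩ := hx
    exact h _ (by omega) (by push_cast; omega)
  have hnd' : ((List.range (s.length + 1)).map (fun n : Nat => (n : Int))).Nodup :=
    List.Nodup.map (fun a b hab => by exact_mod_cast hab) List.nodup_range
  have hle := (List.subperm_of_subset hnd' hsub).length_le
  simp only [List.length_map, List.length_range] at hle
  omega

-- ===== VERDICT (by name: the statement is the Claim_ definition above) =====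
theorem greedy_util_spec : Claim_equal_greedy_util := by
  intro colors _
  unfold Spec_greedy_util greedy_util greedy_util_alt
  set s := PySem.Set.ofList colors with hs
  have hA : IsMexFrom s 0 (greedy_util_loop s 0 (s.length + 1)) :=
    loop_isMexFrom s (s.length + 1) 0 (le_refl _)
      (escape_exists s)
  have hpw : (PySem.List.sorted s (fun x => x) false).Pairwise (· < ·) :=
    PySem.List.sorted_ofList_pairwise_lt colors
  have hB := walk_isMexFrom (PySem.List.sorted s (fun x => x) false) 0 hpw
  have hBmem : IsMexFrom s 0 (greedy_util_alt_walk 0 (PySem.List.sorted s (fun x => x) false)) := by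
    obtain ⟨ha, hb, hc⟩ := hB
    refine ⟨ha, fun hm => hb ((PySem.List.mem_sorted _ _ _ _).mpr hm), fun j hj hjlt => ?_⟩
    exact (PySem.List.mem_sorted _ _ _ _).mp (hc j hj hjlt)
  exact isMexFrom_unique hA hBmem
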